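-- pv_equiv track=rewrite | github.com/njszym/GAOPAW | gaopaw/__init__.py | parseElems
-- ===== SOURCE A (Python) =====
-- def parseElems(formula):
--     """
--     Parse compound formula to obtain unique list of constituent elements.
--     """
--     assert formula[0].isupper(), 'First letter of cmpd formula should be capitalized'
--     letters_only = ''.join([letter for letter in formula if not letter.isdigit()])
--     index = -1
--     elems = []
--     for letter in letters_only:
--         if letter.isupper():
--             elems.append(letter)
--             index += 1
--         else:
--             elems[index] += letter
--     return list(set(elems))
-- ===== SOURCE B (Python) =====
-- def parseElems(formula):
--     """
--     Parse compound formula to obtain unique list of constituent elements.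
--     """
--     assert formula[0].isupper(), 'First letter of cmpd formula should be capitalized'
--     letters_only = ''.join([ch for ch in formula if not ch.isdigit()])
--     bounds = [i for i, ch in enumerate(letters_only) if ch.isupper()]
--     bounds.append(len(letters_only))
--     elems = [letters_only[i:j] for i, j in zip(bounds, bounds[1:])]
--     return list(set(elems))
-- ===== Notes on version B (the rewrite author's own statement) =====
-- stated objective: alternative
-- what changed: Replaces the stateful accumulation loop (index counter plus in-place append to the last element) by an index-table-then-slice decomposition: collect the uppercase boundary positions, append a trailing sentinel, and cut the digit-stripped string at consecutive boundaries.
import Mathlib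
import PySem

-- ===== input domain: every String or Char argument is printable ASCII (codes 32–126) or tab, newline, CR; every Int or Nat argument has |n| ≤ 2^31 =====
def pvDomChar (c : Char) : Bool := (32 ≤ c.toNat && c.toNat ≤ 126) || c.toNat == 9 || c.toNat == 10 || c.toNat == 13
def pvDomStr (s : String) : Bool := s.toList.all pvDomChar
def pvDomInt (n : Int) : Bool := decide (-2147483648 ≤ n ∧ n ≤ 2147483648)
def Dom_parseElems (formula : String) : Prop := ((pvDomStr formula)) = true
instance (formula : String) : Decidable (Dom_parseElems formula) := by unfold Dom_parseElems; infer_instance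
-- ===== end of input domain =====

-- B replaces A's stateful index-tracking loop by an uppercase-boundary index table plus slicing; same O(n) cost, proved equal on Pre_.


-- ===== PORT A =====
-- Python strings are handled as List Char (PySem.Chars conventions); String.ofList is applied at the very end.
-- A's loop: state = (elems, index); `elems[index] += letter` is pyGetD/pySetD at the Int index
-- (exact wherever Python does not raise; under Pre_ the index is always in range).
def goA : List Char → List (List Char) → Int → List (List Char)
  | [], elems, _ => elems
  | c :: rest, elems, index =>
    if PySem.Chars.isupper c then goA rest (elems ++ [[c]]) (index + 1)
    else goA rest (PySem.List.pySetD elems index (PySem.List.pyGetD elems index [] ++ [c])) index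

-- list(set(elems)): order of a Python set is not reproduced; outputs are compared as sets (ret_compare = set).
def parseElems (formula : String) : List String :=
  let letters_only := formula.toList.filter (fun ch => !(PySem.Chars.isdigit ch))
  let elems := goA letters_only [] (-1)
  (PySem.Set.ofList elems).map String.ofList

-- ===== PORT B =====
-- bounds = uppercase positions (via enumerate), plus len as trailing sentinel
def upsB (L : List Char) (s : Int) : List Int :=
  ((PySem.List.enumerate L s).filter (fun p => PySem.Chars.isupper p.2)).map (·.1)

-- [letters_only[i:j] for i, j in zip(bounds, bounds[1:])]
def adjSlices (L : List Char) (bs : List Int) : List (List Char) :=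
  (bs.zip (PySem.List.slice bs (some 1) none)).map
    (fun p => PySem.List.slice L (some p.1) (some p.2))

def parseElems_alt (formula : String) : List String :=
  let letters_only := formula.toList.filter (fun ch => !(PySem.Chars.isdigit ch))
  let bounds := upsB letters_only 0 ++ [(letters_only.length : Int)]
  let elems := adjSlices letters_only bounds
  (PySem.Set.ofList elems).map String.ofList

-- ===== PRECONDITION & SPEC =====
-- Pre_ excludes exactly the inputs where A raises: the empty string (IndexError on formula[0]) and a first
-- character that is not an ASCII uppercase letter (AssertionError); B raises there too.
def Pre_parseElems (formula : String) : Prop :=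
  formula.toList ≠ [] ∧ PySem.Chars.isupper formula.toList.headI = true
instance (formula : String) : Decidable (Pre_parseElems formula) := by unfold Pre_parseElems; infer_instance
def pvWitness_parseElems : String := "NaCl2"

def Spec_parseElems (formula : String) (out : List String) : Prop := out = parseElems_alt formula
instance (formula : String) (out : List String) : Decidable (Spec_parseElems formula out) := by unfold Spec_parseElems; infer_instance

-- ===== CLAIM (what is proved, stated in full; the proofs are below) =====
def Claim_equal_parseElems : Prop := ∀ (formula : String), Dom_parseElems formula → Pre_parseElems formula → Spec_parseElems formula (parseElems formula)

-- ===== LEMMAS AND PROOFS =====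

-- common specification: token list of cur-then-rest, a new token at each uppercase letter
def tks (cur : List Char) : List Char → List (List Char)
  | [] => [cur]
  | c :: rest => if PySem.Chars.isupper c then cur :: tks [c] rest else tks (cur ++ [c]) rest

lemma goA_spec (L : List Char) : ∀ (done : List (List Char)) (cur : List Char),
    goA L (done ++ [cur]) (done.length : Int) = done ++ tks cur L := by
  induction L with
  | nil => intro done cur; simp [goA, tks]
  | cons c rest ih =>
    intro done cur
    by_cases h : PySem.Chars.isupper c = true
    · have h1 : ((done.length : Int) + 1) = (((done ++ [cur]).length : Nat) : Int) := by
        simp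
      rw [show goA (c :: rest) (done ++ [cur]) (done.length : Int)
            = goA rest ((done ++ [cur]) ++ [[c]]) ((done.length : Int) + 1) by simp [goA, h]]
      rw [h1, ih (done ++ [cur]) [c]]
      simp [tks, h]
    · have hg : PySem.List.pyGetD (done ++ [cur]) (done.length : Int) [] = cur := by
        simp [PySem.List.pyGetD_natCast]
      rw [show goA (c :: rest) (done ++ [cur]) (done.length : Int)
            = goA rest (PySem.List.pySetD (done ++ [cur]) (done.length : Int)
                (PySem.List.pyGetD (done ++ [cur]) (done.length : Int) [] ++ [c])) (done.length : Int)
          by simp [goA, h]]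
      rw [hg, show PySem.List.pySetD (done ++ [cur]) (done.length : Int) (cur ++ [c])
            = done ++ [cur ++ [c]] by simp [PySem.List.pySetD_natCast]]
      rw [ih done (cur ++ [c])]
      simp [tks, h]

lemma upsB_nil (s : Int) : upsB [] s = [] := by simp [upsB, PySem.List.enumerate_nil]

lemma upsB_cons (c : Char) (M : List Char) (s : Int) :
    upsB (c :: M) s = (if PySem.Chars.isupper c then [s] else []) ++ upsB M (s + 1) := by
  by_cases h : PySem.Chars.isupper c = true <;>
    simp [upsB, PySem.List.enumerate_cons, h]

lemma adjSlices_cons (L : List Char) (a b : Int) (t : List Int) :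
    adjSlices L (a :: b :: t) = PySem.List.slice L (some a) (some b) :: adjSlices L (b :: t) := by
  simp [adjSlices, PySem.List.slice_from_one, List.zip]

lemma adjSlices_single (L : List Char) (a : Int) : adjSlices L [a] = [] := by
  simp [adjSlices, PySem.List.slice_from_one]

lemma slice_mid (Q cur M : List Char) (q s : Int)
    (hq : q = (Q.length : Int)) (hs : s = q + (cur.length : Int)) :
    PySem.List.slice (Q ++ cur ++ M) (some q) (some s) = cur := by
  subst hq hs
  rw [show ((Q.length : Int) + (cur.length : Int)) = (((Q.length + cur.length : Nat)) : Int) by push_cast; ring]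
  rw [PySem.List.slice_natCast]
  simp

lemma adjSlices_spec (M : List Char) : ∀ (Q cur : List Char) (q s e : Int),
    q = (Q.length : Int) → s = q + (cur.length : Int) → e = s + (M.length : Int) →
    adjSlices (Q ++ cur ++ M) (q :: (upsB M s ++ [e])) = tks cur M := by
  induction M with
  | nil =>
    intro Q cur q s e hq hs he
    simp only [upsB_nil, List.nil_append]
    -- bounds are now [q, e]
    rw [adjSlices_cons, adjSlices_single,
      slice_mid Q cur [] q e hq (by simp only [List.length_nil, Nat.cast_zero] at he; omega)]
    rfl
  | cons c R ih =>
    intro Q cur q s e hq hs he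
    by_cases h : PySem.Chars.isupper c = true
    · rw [upsB_cons, if_pos h]
      simp only [List.cons_append]
      rw [adjSlices_cons, slice_mid Q cur (c :: R) q s hq hs]
      rw [show Q ++ cur ++ c :: R = (Q ++ cur) ++ [c] ++ R by simp]
      simp only [List.nil_append]
      rw [ih (Q ++ cur) [c] s (s + 1) e
        (by simp only [List.length_append] at hq hs ⊢; push_cast at hq hs ⊢; omega)
        (by simp only [List.length_singleton]; push_cast; omega)
        (by simp only [List.length_cons] at he ⊢; push_cast at he ⊢; omega)]
      simp [tks, h]
    · rw [upsB_cons, if_neg h]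
      simp only [List.nil_append]
      rw [show Q ++ cur ++ c :: R = Q ++ (cur ++ [c]) ++ R by simp]
      rw [ih Q (cur ++ [c]) q (s + 1) e hq
        (by simp only [List.length_append, List.length_singleton] at hs ⊢; push_cast at hs ⊢; omega)
        (by simp only [List.length_cons] at he ⊢; push_cast at he ⊢; omega)]
      simp [tks, h]

lemma isupper_not_isdigit (c : Char) (h : PySem.Chars.isupper c = true) :
    PySem.Chars.isdigit c = false := by
  simp only [PySem.Chars.isupper, PySem.Chars.isdigit, Bool.and_eq_true, decide_eq_true_eq] at *
  rw [Bool.and_eq_false_iff]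
  right
  simp only [decide_eq_false_iff_not, not_le]
  exact lt_of_lt_of_le (by decide : ('9' : Char) < 'A') h.1

-- ===== VERDICT (by name: the statement is the Claim_ definition above) =====
theorem parseElems_spec : Claim_equal_parseElems := by
  intro formula _ hpre
  obtain ⟨hne, hup⟩ := hpre
  obtain ⟨u, rest, hL⟩ : ∃ u rest, formula.toList = u :: rest := by
    cases h : formula.toList with
    | nil => exact absurd h hne
    | cons u r => exact ⟨u, r, rfl⟩
  rw [hL] at hup
  simp only [List.headI] at hup
  unfold Spec_parseElems parseElems parseElems_alt
  rw [hL]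
  have hfil : (u :: rest).filter (fun ch => !(PySem.Chars.isdigit ch))
      = u :: rest.filter (fun ch => !(PySem.Chars.isdigit ch)) := by
    rw [List.filter_cons_of_pos]
    simp [isupper_not_isdigit u hup]
  set M := rest.filter (fun ch => !(PySem.Chars.isdigit ch)) with hM
  rw [hfil]
  have hA : goA (u :: M) [] (-1) = tks [u] M := by
    have := goA_spec M ([] : List (List Char)) [u]
    simpa [goA, hup] using this
  have hB : adjSlices (u :: M) (upsB (u :: M) 0 ++ [((u :: M).length : Int)]) = tks [u] M := by
    rw [upsB_cons, if_pos hup]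
    have := adjSlices_spec M ([] : List Char) [u] 0 1 ((u :: M).length : Int)
      (by simp) (by simp) (by simp only [List.length_cons]; push_cast; omega)
    simpa using this
  simp only [hA, hB]
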